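-- pv_equiv track=rewrite | github.com/sabrown89/python-practice-problems | interviews/cardlytics/app/amazing_strings.py | count_of_repeating_letters
-- ===== SOURCE A (Python) =====
-- def count_of_repeating_letters(string):
--     length = len(string) - 1
--     count = 0
--     repeating_list = []
--     for num in range(0,length):
--         if num + 1 == length and string[num] == string[num + 1]:
--             count += 1
--             repeating_list.append(count)
--         elif string[num] == string[num + 1]:
--             count += 1
--         else:
--             if count > 0:
--                 repeating_list.append(count)
--             count = 0
--     return repeating_list
-- ===== SOURCE B (Python) =====
-- from itertools import groupby
--
--
-- def count_of_repeating_letters(string):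
--     run_lengths = [sum(1 for _ in group) for _, group in groupby(string)]
--     return [length - 1 for length in run_lengths if length > 1]
-- ===== Notes on version B (the rewrite author's own statement) =====
-- stated objective: idiomatic
-- what changed: B first partitions the string into maximal run lengths with itertools.groupby, then emits length-1 for every run longer than 1, replacing A's index-based loop with its last-index special case and mutable counter.
import Mathlib
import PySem

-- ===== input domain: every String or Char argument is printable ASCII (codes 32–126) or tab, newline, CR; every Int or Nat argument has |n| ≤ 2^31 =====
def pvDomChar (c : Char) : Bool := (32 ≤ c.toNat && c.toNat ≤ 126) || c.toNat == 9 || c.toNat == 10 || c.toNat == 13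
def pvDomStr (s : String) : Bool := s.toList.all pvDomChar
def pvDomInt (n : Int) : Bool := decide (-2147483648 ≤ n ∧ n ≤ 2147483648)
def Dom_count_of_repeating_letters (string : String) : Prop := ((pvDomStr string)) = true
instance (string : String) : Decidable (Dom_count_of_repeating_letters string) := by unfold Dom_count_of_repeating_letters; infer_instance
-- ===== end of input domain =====

-- B replaces A's index loop by a run-length decomposition (groupby) followed by a filter; same cost, more idiomatic.

-- ===== PORT A =====
-- the for-loop over range(0, length) with its mutable (count, repeating_list) state
def pvALoop (cs : List Char) (length : Int) (count : Int) (acc : List Int) :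
    List Int → List Int
  | [] => acc
  | num :: rest =>
    let c1 := PySem.List.pyGetD cs num ' '      -- index always in range here (num+1 ≤ length < len cs)
    let c2 := PySem.List.pyGetD cs (num + 1) ' '
    if num + 1 = length ∧ c1 = c2 then
      pvALoop cs length (count + 1) (acc ++ [count + 1]) rest
    else if c1 = c2 then
      pvALoop cs length (count + 1) acc rest
    else
      pvALoop cs length 0 (if count > 0 then acc ++ [count] else acc) rest

def count_of_repeating_letters (string : String) : List Int :=
  let cs := string.toList
  let length : Int := (cs.length : Int) - 1
  pvALoop cs length 0 [] (PySem.List.pyRange 0 length 1)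

-- ===== PORT B =====
-- groupby: pvGo consumes one maximal run (current char c, length so far k), pvRunLengths starts it
def pvGo (c : Char) (k : Nat) : List Char → List Nat
  | [] => [k]
  | b :: rest => if b = c then pvGo c (k + 1) rest else k :: pvGo b 1 rest

def pvRunLengths : List Char → List Nat
  | [] => []
  | a :: rest => pvGo a 1 rest

def count_of_repeating_letters_alt (string : String) : List Int :=
  (pvRunLengths string.toList).filterMap
    (fun (k : Nat) => if k > 1 then some ((k : Int) - 1) else none)

-- ===== PRECONDITION & SPEC =====
def Spec_count_of_repeating_letters (string : String) (out : List Int) : Prop := out = count_of_repeating_letters_alt string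
instance (string : String) (out : List Int) : Decidable (Spec_count_of_repeating_letters string out) := by unfold Spec_count_of_repeating_letters; infer_instance

-- ===== CLAIM (what is proved, stated in full; the proofs are below) =====
def Claim_equal_count_of_repeating_letters : Prop := ∀ (string : String), Dom_count_of_repeating_letters string → Spec_count_of_repeating_letters string (count_of_repeating_letters string)

-- ===== LEMMAS AND PROOFS =====

-- A's loop, re-expressed as a recursion over the suffix of characters still to be compared
def pvGG : List Char → Int → List Int → List Int
  | a :: b :: rest, count, acc =>
    if rest = [] then
      (if a = b then acc ++ [count + 1] else if count > 0 then acc ++ [count] else acc)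
    else if a = b then pvGG (b :: rest) (count + 1) acc
    else pvGG (b :: rest) 0 (if count > 0 then acc ++ [count] else acc)
  | _, _, acc => acc

lemma pv_getD_of_drop (cs : List Char) (i : Nat) (a : Char) (suf : List Char)
    (h : cs.drop i = a :: suf) : cs.getD i ' ' = a := by
  have h1 : (cs.drop i)[0]? = some a := by simp [h]
  rw [List.getElem?_drop] at h1
  simp at h1
  simp [List.getD_eq_getElem?_getD, h1]

lemma pv_bridge (cs : List Char) (suf : List Char) :
    ∀ (i : Nat) (count : Int) (acc : List Int), cs.drop i = suf →
      pvALoop cs ((cs.length : Int) - 1) count acc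
        (PySem.List.pyRange (i : Int) ((cs.length : Int) - 1) 1) = pvGG suf count acc := by
  induction suf generalizing cs with
  | nil =>
    intro i count acc hdrop
    have hlen : cs.length ≤ i := by
      have := congrArg List.length hdrop; simp at this; omega
    rw [PySem.List.pyRange_one_eq_nil (by omega)]
    simp [pvALoop, pvGG]
  | cons a tail ih =>
    intro i count acc hdrop
    cases tail with
    | nil =>
      have hlen : cs.length = i + 1 := by
        have := congrArg List.length hdrop; simp at this; omega
      rw [PySem.List.pyRange_one_eq_nil (by omega)]
      simp [pvALoop, pvGG]
    | cons b rest =>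
      have hlen : i + rest.length + 2 = cs.length := by
        have := congrArg List.length hdrop; simp at this; omega
      have hlt : (i : Int) < (cs.length : Int) - 1 := by omega
      rw [PySem.List.pyRange_one_cons hlt]
      have hdrop' : cs.drop (i + 1) = b :: rest := by
        have h2 : (cs.drop i).drop 1 = (a :: b :: rest).drop 1 := by rw [hdrop]
        simpa [List.drop_drop, Nat.add_comm] using h2
      have hca : cs.getD i ' ' = a := pv_getD_of_drop cs i a (b :: rest) hdrop
      have hcb : cs.getD (i + 1) ' ' = b := pv_getD_of_drop cs (i + 1) b rest hdrop'
      have hrec := ih cs (i + 1) count acc hdrop'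
      have hcast : ((i : Int) + 1) = ((i + 1 : Nat) : Int) := by push_cast; ring
      have hpy2 : PySem.List.pyGetD cs ((i : Int) + 1) ' ' = b := by
        rw [hcast, PySem.List.pyGetD_natCast]; exact hcb
      simp only [pvALoop, PySem.List.pyGetD_natCast, hca, hpy2]
      by_cases hend : rest = []
      · subst hend
        simp only [List.length_nil] at hlen
        have hlast : (i : Int) + 1 = (cs.length : Int) - 1 := by omega
        by_cases hab : a = b
        · rw [if_pos ⟨hlast, hab⟩, hcast, ih cs (i + 1) (count + 1) (acc ++ [count + 1]) hdrop']
          simp [pvGG, hab]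
        · rw [if_neg (by tauto), if_neg hab, hcast,
            ih cs (i + 1) 0 (if count > 0 then acc ++ [count] else acc) hdrop']
          simp [pvGG, hab]
      · have hnotlast : ¬ ((i : Int) + 1 = (cs.length : Int) - 1) := by
          have : 0 < rest.length := List.length_pos_iff.mpr hend
          omega
        by_cases hab : a = b
        · rw [if_neg (by tauto), if_pos hab, hcast,
            ih cs (i + 1) (count + 1) acc hdrop']
          rw [pvGG]
          simp [hab, hend]
        · rw [if_neg (by tauto), if_neg hab, hcast,
            ih cs (i + 1) 0 (if count > 0 then acc ++ [count] else acc) hdrop']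
          rw [pvGG]
          simp [hab, hend]

lemma pv_runs (rest : List Char) : ∀ (a b : Char) (k : Nat) (acc : List Int), 1 ≤ k →
    pvGG (a :: b :: rest) ((k : Int) - 1) acc =
      acc ++ (pvGo a k (b :: rest)).filterMap
        (fun (k : Nat) => if k > 1 then some ((k : Int) - 1) else none) := by
  induction rest with
  | nil =>
    intro a b k acc hk
    by_cases hab : a = b
    · subst hab
      have hgo : pvGo a k [a] = [k + 1] := by simp [pvGo]
      rw [pvGG]
      simp [hgo, List.filterMap, show 1 < k + 1 by omega]
    · have hba : ¬ b = a := fun h => hab h.symm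
      by_cases h1 : 1 < k
      · simp [pvGG, pvGo, hab, hba, h1]
      · simp [pvGG, pvGo, hab, hba, h1]
  | cons c rest' ih =>
    intro a b k acc hk
    by_cases hab : a = b
    · subst hab
      have hcount : (k : Int) - 1 + 1 = ((k + 1 : Nat) : Int) - 1 := by push_cast; ring
      rw [pvGG, if_neg (by simp), if_pos rfl, hcount, ih a c (k + 1) acc (by omega)]
      simp [pvGo]
    · have hba : ¬ b = a := fun h => hab h.symm
      have ih' := ih b c 1 (if (k : Int) - 1 > 0 then acc ++ [(k : Int) - 1] else acc) (by omega)
      have h0 : ((1 : Nat) : Int) - 1 = 0 := by norm_num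
      rw [h0] at ih'
      rw [pvGG, if_neg (by simp), if_neg hab, ih']
      by_cases h1 : 1 < k
      · simp [pvGo, hba, h1]
      · simp [pvGo, hba, h1]

lemma pv_main (cs : List Char) :
    pvALoop cs ((cs.length : Int) - 1) 0 [] (PySem.List.pyRange 0 ((cs.length : Int) - 1) 1)
      = (pvRunLengths cs).filterMap (fun (k : Nat) => if k > 1 then some ((k : Int) - 1) else none) := by
  have hb := pv_bridge cs cs 0 0 [] (by simp)
  simp only [Nat.cast_zero] at hb
  rw [hb]
  cases cs with
  | nil => simp [pvGG, pvRunLengths]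
  | cons a tail =>
    cases tail with
    | nil => simp [pvGG, pvRunLengths, pvGo]
    | cons b rest =>
      have h := pv_runs rest a b 1 [] (by omega)
      simpa [pvRunLengths] using h

-- ===== VERDICT (by name: the statement is the Claim_ definition above) =====
theorem count_of_repeating_letters_spec : Claim_equal_count_of_repeating_letters := by
  intro string _
  unfold Spec_count_of_repeating_letters count_of_repeating_letters count_of_repeating_letters_alt
  exact pv_main string.toList
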